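-- pv_equiv track=rewrite | github.com/plturrell/a2a-sap-network | a2aAgents/backend/app/a2a/agents/agent4CalcValidation/active/comprehensiveCalcValidationSdk.py | _calculate_error_severity
-- ===== SOURCE A (Python) =====
-- from typing import Dict, List, Any, Tuple
--
-- def _calculate_error_severity(issues: List[str]) -> str:
--     """Calculate overall error severity"""
--     if any(issue in ['division_by_zero', 'domain_error'] for issue in issues):
--         return 'critical'
--     elif any(issue in ['overflow_risk', 'underflow_risk'] for issue in issues):
--         return 'high'
--     elif issues:
--         return 'medium'
--     return 'low'
-- ===== SOURCE B (Python) =====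
-- def _calculate_error_severity(issues):
--     """Single-pass max-rank classification."""
--     rank = 0
--     for issue in issues:
--         if issue in ('division_by_zero', 'domain_error'):
--             r = 3
--         elif issue in ('overflow_risk', 'underflow_risk'):
--             r = 2
--         else:
--             r = 1
--         if r > rank:
--             rank = r
--     return ('low', 'medium', 'high', 'critical')[rank]
-- ===== Notes on version B (the rewrite author's own statement) =====
-- stated objective: alternative
-- what changed: Replaced three priority-ordered any() scans over the list with one pass maintaining a max severity rank, mapped to a label at the end.
import Mathlib
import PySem

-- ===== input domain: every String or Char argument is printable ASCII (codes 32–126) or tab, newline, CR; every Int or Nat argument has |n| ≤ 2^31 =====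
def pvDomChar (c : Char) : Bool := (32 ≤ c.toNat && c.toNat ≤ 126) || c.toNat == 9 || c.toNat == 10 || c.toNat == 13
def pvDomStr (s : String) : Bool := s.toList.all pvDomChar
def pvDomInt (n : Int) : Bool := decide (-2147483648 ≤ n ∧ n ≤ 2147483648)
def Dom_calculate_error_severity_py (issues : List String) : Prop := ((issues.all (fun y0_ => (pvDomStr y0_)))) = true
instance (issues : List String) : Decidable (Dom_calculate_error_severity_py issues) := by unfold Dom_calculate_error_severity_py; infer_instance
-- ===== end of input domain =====

-- B replaces A's three priority-ordered any() scans by one max-rank pass; objective: alternative decomposition.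

-- ===== PORT A =====
-- A: any(issue in [...]) → any(issue in [...]) → elif issues (truthiness) → 'low'
def calculate_error_severity_py (issues : List String) : String :=
  if issues.any (fun issue => issue ∈ ["division_by_zero", "domain_error"]) then
    "critical"
  else if issues.any (fun issue => issue ∈ ["overflow_risk", "underflow_risk"]) then
    "high"
  else if issues ≠ [] then
    "medium"
  else
    "low"

-- ===== PORT B =====
-- single pass maintaining an integer rank, then table lookup
def pvRankStep (rank : Nat) (issue : String) : Nat :=
  let r : Nat :=
    if issue ∈ ["division_by_zero", "domain_error"] then 3
    else if issue ∈ ["overflow_risk", "underflow_risk"] then 2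
    else 1
  if r > rank then r else rank

def pvLabel (rank : Nat) : String :=
  match rank with
  | 0 => "low"
  | 1 => "medium"
  | 2 => "high"
  | _ => "critical"

def calculate_error_severity_py_alt (issues : List String) : String :=
  pvLabel (issues.foldl pvRankStep 0)

-- ===== PRECONDITION & SPEC =====
def Spec_calculate_error_severity_py (issues : List String) (out : String) : Prop := out = calculate_error_severity_py_alt issues
instance (issues : List String) (out : String) : Decidable (Spec_calculate_error_severity_py issues out) := by unfold Spec_calculate_error_severity_py; infer_instance

-- ===== CLAIM (what is proved, stated in full; the proofs are below) =====
def Claim_equal_calculate_error_severity_py : Prop := ∀ (issues : List String), Dom_calculate_error_severity_py issues → Spec_calculate_error_severity_py issues (calculate_error_severity_py issues)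

-- ===== LEMMAS AND PROOFS =====

-- the rank the fold converges to, in closed form
def pvRankOf (issues : List String) : Nat :=
  if issues.any (fun issue => issue ∈ ["division_by_zero", "domain_error"]) then 3
  else if issues.any (fun issue => issue ∈ ["overflow_risk", "underflow_risk"]) then 2
  else if issues ≠ [] then 1
  else 0

theorem pvFold_eq_max (issues : List String) : ∀ r : Nat,
    issues.foldl pvRankStep r = max r (pvRankOf issues) := by
  induction issues with
  | nil => intro r; simp [pvRankOf]
  | cons i is ih =>
    intro r
    simp only [List.foldl_cons, ih]
    have h1 : pvRankStep r i = max r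
        (if i ∈ ["division_by_zero", "domain_error"] then 3
         else if i ∈ ["overflow_risk", "underflow_risk"] then 2 else 1) := by
      simp only [pvRankStep]
      split_ifs <;> omega
    rw [h1]
    have h2 : pvRankOf (i :: is) = max
        (if i ∈ ["division_by_zero", "domain_error"] then 3
         else if i ∈ ["overflow_risk", "underflow_risk"] then 2 else 1)
        (pvRankOf is) := by
      simp only [pvRankOf, List.any_cons]
      by_cases hc : i ∈ ["division_by_zero", "domain_error"] <;>
        by_cases hh : i ∈ ["overflow_risk", "underflow_risk"] <;>
          simp [hc, hh] <;> split_ifs <;> simp_all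
    rw [h2]
    omega

-- ===== VERDICT (by name: the statement is the Claim_ definition above) =====
theorem calculate_error_severity_py_spec : Claim_equal_calculate_error_severity_py := by
  intro issues _
  show _ = _
  rw [calculate_error_severity_py_alt, pvFold_eq_max]
  simp only [Nat.zero_max]
  rw [calculate_error_severity_py, pvRankOf]
  split_ifs <;> rfl
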